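-- pv_equiv track=rewrite | github.com/henry167b/DSA4265-group8 | backend/agents/filing_chunker.py | _combine_header_rows
-- ===== SOURCE A (Python) =====
-- from typing import Dict, List, Optional, Tuple
--
-- def _combine_header_rows(header_rows: List[List[str]]) -> List[str]:
--     if not header_rows:
--         return []
--     width = max(len(row) for row in header_rows)
--     combined = [""] * width
--     for idx in range(width):
--         parts = []
--         for row in header_rows:
--             if idx >= len(row):
--                 continue
--             value = row[idx].strip()
--             if value and value not in parts:
--                 parts.append(value)
--         combined[idx] = " ".join(parts).strip()
--     return combined
-- ===== SOURCE B (Python) =====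
-- from typing import List
--
-- def _combine_header_rows(header_rows: List[List[str]]) -> List[str]:
--     combined = []
--     rows = [r for r in header_rows if r]
--     while rows:
--         parts = dict.fromkeys(v for v in (r[0].strip() for r in rows) if v)
--         combined.append(" ".join(parts).strip())
--         rows = [r[1:] for r in rows if len(r) > 1]
--     return combined
-- ===== Notes on version B (the rewrite author's own statement) =====
-- stated objective: alternative
-- what changed: B peels the table column by column (repeatedly take every surviving row's first cell, dedup via dict.fromkeys, then advance each row by slicing off its head), instead of A's indexed nested loops over range(width) with a list-membership dedup; B needs no width computation and no index arithmetic.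
import Mathlib
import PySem

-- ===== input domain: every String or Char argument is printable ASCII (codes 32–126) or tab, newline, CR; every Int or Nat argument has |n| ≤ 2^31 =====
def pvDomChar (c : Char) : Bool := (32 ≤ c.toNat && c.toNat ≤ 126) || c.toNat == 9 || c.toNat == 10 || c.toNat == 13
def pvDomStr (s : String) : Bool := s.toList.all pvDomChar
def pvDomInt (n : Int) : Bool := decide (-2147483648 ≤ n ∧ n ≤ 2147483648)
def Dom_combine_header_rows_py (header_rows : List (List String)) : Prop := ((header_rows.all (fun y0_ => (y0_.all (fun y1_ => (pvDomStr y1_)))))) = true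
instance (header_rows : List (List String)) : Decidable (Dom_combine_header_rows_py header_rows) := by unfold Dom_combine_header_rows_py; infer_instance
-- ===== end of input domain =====

-- B peels the table column by column (dedup via dict.fromkeys) instead of A's indexed nested loops over range(width); return value only, no mutation.
-- ===== PORT A =====
-- the three Python lines "value = row[idx].strip(); if value and value not in parts: parts.append(value)"
def pvAddValue (parts : List String) (cell : String) : List String :=
  let value := PySem.Str.strip cell
  if value ≠ "" ∧ value ∉ parts then parts ++ [value] else parts

def combine_header_rows_py (header_rows : List (List String)) : List String :=
  if header_rows = [] then []
  else
    let width := (header_rows.map List.length).foldl max 0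
    (List.range width).map (fun idx =>
      let parts := header_rows.foldl
        (fun parts row => if idx < row.length then pvAddValue parts (row.getD idx "") else parts) []
      PySem.Str.strip (PySem.Str.join " " parts))

-- ===== PORT B =====
-- one loop iteration: "dict.fromkeys(v for v in (r[0].strip() for r in rows) if v)" then join+strip;
-- r[0] never raises in Source B (rows holds only nonempty rows), so headD "" is exact here
def pvColumn (rows : List (List String)) : String :=
  PySem.Str.strip (PySem.Str.join " "
    (PySem.List.dedup ((rows.map (fun r => PySem.Str.strip (r.headD ""))).filter (fun v => v ≠ ""))))

-- "rows = [r[1:] for r in rows if len(r) > 1]"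
def pvNext (rows : List (List String)) : List (List String) :=
  (rows.filter (fun r => 1 < r.length)).map (fun r => r.drop 1)

def pvMeasure (rows : List (List String)) : Nat := rows.length + (rows.map List.length).sum

-- termination measure for Source B's while loop: each iteration shrinks pvMeasure
theorem pvMeasure_aux (rows : List (List String)) :
    pvMeasure (pvNext rows) ≤ (rows.map List.length).sum := by
  induction rows with
  | nil => simp [pvMeasure, pvNext]
  | cons r rest ih =>
    by_cases h : 1 < r.length <;>
      simp [pvNext, pvMeasure, h, List.map_map] at ih ⊢ <;>
      omega

theorem pvMeasure_lt (rows : List (List String)) (h : rows ≠ []) :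
    pvMeasure (pvNext rows) < pvMeasure rows := by
  have h1 := pvMeasure_aux rows
  have h2 : 0 < rows.length := List.length_pos_of_ne_nil h
  unfold pvMeasure at *
  omega

-- the while loop: emit the current first column, then peel every surviving row
def pvPeel (rows : List (List String)) : List String :=
  if h : rows = [] then []
  else pvColumn rows :: pvPeel (pvNext rows)
termination_by pvMeasure rows
decreasing_by exact pvMeasure_lt rows h

def combine_header_rows_py_alt (header_rows : List (List String)) : List String :=
  pvPeel (header_rows.filter (fun r => r ≠ []))

-- ===== PRECONDITION & SPEC =====
def Spec_combine_header_rows_py (header_rows : List (List String)) (out : List String) : Prop := out = combine_header_rows_py_alt header_rows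
instance (header_rows : List (List String)) (out : List String) : Decidable (Spec_combine_header_rows_py header_rows out) := by unfold Spec_combine_header_rows_py; infer_instance

-- ===== CLAIM (what is proved, stated in full; the proofs are below) =====
def Claim_equal_combine_header_rows_py : Prop := ∀ (header_rows : List (List String)), Dom_combine_header_rows_py header_rows → Spec_combine_header_rows_py header_rows (combine_header_rows_py header_rows)

-- ===== LEMMAS AND PROOFS =====

theorem pvPeel_nil : pvPeel [] = [] := by
  rw [pvPeel.eq_def]
  simp

theorem pvPeel_ne (rows : List (List String)) (h : rows ≠ []) :
    pvPeel rows = pvColumn rows :: pvPeel (pvNext rows) := by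
  conv_lhs => rw [pvPeel.eq_def]
  exact dif_neg h

-- A's column value at index idx, exactly as the body of A's port writes it
def colA (hr : List (List String)) (idx : Nat) : String :=
  PySem.Str.strip (PySem.Str.join " "
    (hr.foldl (fun parts row => if idx < row.length then pvAddValue parts (row.getD idx "") else parts) []))

theorem foldl_max_le (xs : List Nat) (a b : Nat) (ha : a ≤ b) (h : ∀ x ∈ xs, x ≤ b) :
    xs.foldl max a ≤ b := by
  induction xs generalizing a with
  | nil => exact ha
  | cons x rest ih =>
    exact ih (max a x) (by have := h x (by simp); omega) (fun y hy => h y (by simp [hy]))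

-- dict.fromkeys (= PySem.List.dedup) is the "if v not in parts: parts.append(v)" accumulation
theorem dedup_eq_foldl (l : List String) :
    PySem.List.dedup l = l.foldl (fun parts v => if v ∈ parts then parts else parts ++ [v]) [] := by
  rw [PySem.List.dedup_eq_ofList]
  unfold PySem.Set.ofList
  have h : ∀ (init : List String),
      l.foldl PySem.Set.add init =
        l.foldl (fun parts v => if v ∈ parts then parts else parts ++ [v]) init := by
    induction l with
    | nil => intro init; rfl
    | cons x rest ih =>
      intro init
      simp only [List.foldl_cons, ih]
      congr 1
      simp [PySem.Set.add]
  exact h PySem.Set.empty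

theorem foldl_pvAddValue (xs : List String) :
    xs.foldl pvAddValue [] =
      PySem.List.dedup ((xs.map PySem.Str.strip).filter (fun v => v ≠ "")) := by
  have h1 : xs.foldl pvAddValue [] =
      (xs.map PySem.Str.strip).foldl
        (fun parts v => if v ≠ "" ∧ v ∉ parts then parts ++ [v] else parts) [] := by
    rw [List.foldl_map]
    rfl
  rw [h1]
  have h2 : ∀ (init : List String) (l : List String),
      l.foldl (fun parts v => if v ≠ "" ∧ v ∉ parts then parts ++ [v] else parts) init =
        l.foldl (fun parts v => if v ≠ "" then (if v ∈ parts then parts else parts ++ [v]) else parts) init := by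
    intro init l
    induction l generalizing init with
    | nil => rfl
    | cons x rest ih =>
      simp only [List.foldl_cons, ih]
      congr 1
      by_cases hx : x = "" <;> by_cases hm : x ∈ init <;> simp [hx, hm]
  rw [h2, PySem.List.foldl_ite_eq_foldl_filter (fun v => v ≠ "")
        (fun parts v => if v ∈ parts then parts else parts ++ [v]),
      dedup_eq_foldl]

-- B's current column equals A's column at idx, when rows = the idx-step tails of hr
theorem col_eq (hr : List (List String)) (idx : Nat) :
    pvColumn ((hr.filter (fun r => decide (idx < r.length))).map (List.drop idx)) = colA hr idx := by
  unfold pvColumn colA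
  rw [PySem.List.foldl_ite_eq_foldl_filter (fun row : List String => idx < row.length)
        (fun parts row => pvAddValue parts (row.getD idx "")),
      ← List.foldl_map (f := fun r : List String => r.getD idx ""), foldl_pvAddValue]
  congr 2
  rw [List.map_map, List.map_map]
  congr 1
  congr 1
  apply List.map_congr_left
  intro r hr'
  have hlen : idx < r.length := by
    have h := (List.mem_filter.mp hr').2
    simpa using h
  simp only [Function.comp]
  congr 1
  rw [List.getD_eq_getElem?_getD, List.headD_eq_head?_getD, List.head?_drop]

set_option maxHeartbeats 1000000 in
theorem peel_spec (k : Nat) : ∀ (idx : Nat) (hr : List (List String)),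
    (∀ r ∈ hr, r.length ≤ idx + k) →
    pvPeel ((hr.filter (fun r => decide (idx < r.length))).map (List.drop idx)) =
      (List.range ((hr.map List.length).foldl max 0 - idx)).map (fun j => colA hr (idx + j)) := by
  induction k with
  | zero =>
    intro idx hr h
    have hfil : hr.filter (fun r => decide (idx < r.length)) = [] := by
      rw [List.filter_eq_nil_iff]
      intro r hrmem
      have := h r hrmem
      simp; omega
    have hW : (hr.map List.length).foldl max 0 ≤ idx := by
      apply foldl_max_le _ _ _ (Nat.zero_le _)
      intro x hx
      obtain ⟨r, hrmem, rfl⟩ := List.mem_map.mp hx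
      have := h r hrmem; omega
    rw [hfil]
    simp [pvPeel_nil, Nat.sub_eq_zero_of_le hW]
  | succ k ih =>
    intro idx hr h
    by_cases hW : (hr.map List.length).foldl max 0 ≤ idx
    · have hfil : hr.filter (fun r => decide (idx < r.length)) = [] := by
        rw [List.filter_eq_nil_iff]
        intro r hrmem
        have := ((PySem.List.le_foldl_max (hr.map List.length) 0).2 r.length
          (List.mem_map_of_mem hrmem))
        simp; omega
      rw [hfil]
      simp [pvPeel_nil, Nat.sub_eq_zero_of_le hW]
    · have hWlt : idx < (hr.map List.length).foldl max 0 := by omega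
      -- some row reaches column idx, so the peeled list is nonempty
      have hex : ∃ r ∈ hr, idx < r.length := by
        by_contra hc
        have hc' : ∀ r ∈ hr, r.length ≤ idx := by
          intro r hrmem
          by_contra hlen
          exact hc ⟨r, hrmem, by omega⟩
        exact absurd (foldl_max_le (hr.map List.length) 0 idx (Nat.zero_le _)
          (by intro x hx; obtain ⟨r, hrmem, rfl⟩ := List.mem_map.mp hx; exact hc' r hrmem)) (by omega)
      obtain ⟨r0, hr0, hl0⟩ := hex
      have hne : (hr.filter (fun r => decide (idx < r.length))).map (List.drop idx) ≠ [] := by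
        simp only [ne_eq, List.map_eq_nil_iff, List.filter_eq_nil_iff]
        intro hc
        exact absurd hl0 (by simpa using hc r0 hr0)
      rw [pvPeel_ne _ hne]
      -- the next loop state is exactly the (idx+1)-step tails of hr
      have hnext :
          pvNext ((hr.filter (fun r => decide (idx < r.length))).map (List.drop idx)) =
            (hr.filter (fun r => decide (idx + 1 < r.length))).map (List.drop (idx + 1)) := by
        unfold pvNext
        rw [List.filter_map, List.map_map, List.filter_filter]
        have hp : ∀ r : List String,
            (((fun r : List String => decide (1 < r.length)) ∘ List.drop idx) r &&
              decide (idx < r.length)) = decide (idx + 1 < r.length) := by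
          intro r
          simp only [Function.comp, List.length_drop]
          by_cases h1 : idx + 1 < r.length
          · simp [h1, show 1 < r.length - idx by omega, show idx < r.length by omega]
          · have h2 : ¬(1 < r.length - idx) ∨ ¬(idx < r.length) := by omega
            rcases h2 with h2 | h2 <;> simp [h1, h2]
        rw [List.filter_congr (fun r _ => hp r)]
        apply List.map_congr_left
        intro r _
        simp [Function.comp, List.drop_drop]
      rw [hnext, ih (idx + 1) hr (by intro r hrmem; have := h r hrmem; omega)]
      have hsub : (hr.map List.length).foldl max 0 - idx =
          ((hr.map List.length).foldl max 0 - (idx + 1)) + 1 := by omega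
      rw [hsub, List.range_succ_eq_map, List.map_cons, List.map_map]
      refine congrArg₂ List.cons (col_eq hr idx) ?_
      apply List.map_congr_left
      intro j _
      simp only [Function.comp]
      exact congrArg (colA hr) (by omega)

-- ===== VERDICT (by name: the statement is the Claim_ definition above) =====
theorem combine_header_rows_py_spec : Claim_equal_combine_header_rows_py := by
  intro hr _
  unfold Spec_combine_header_rows_py combine_header_rows_py_alt
  by_cases hne : hr = []
  · simp [hne, pvPeel_nil, combine_header_rows_py]
  · have hA : combine_header_rows_py hr =
        (List.range ((hr.map List.length).foldl max 0)).map (fun idx => colA hr idx) := by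
      unfold combine_header_rows_py
      rw [if_neg hne]
      rfl
    have hbound : ∀ r ∈ hr, r.length ≤ 0 + (hr.map List.length).foldl max 0 := by
      intro r hrmem
      have h1 : r.length ≤ (hr.map List.length).foldl max 0 :=
        (PySem.List.le_foldl_max (hr.map List.length) 0).2 r.length (List.mem_map_of_mem hrmem)
      omega
    have hstart : hr.filter (fun r => r ≠ []) =
        (hr.filter (fun r => decide (0 < r.length))).map (List.drop 0) := by
      rw [show (List.drop 0 : List String → List String) = id from funext (fun l => List.drop_zero),
        List.map_id]
      apply List.filter_congr
      intro r _
      rcases r with _ | ⟨c, r⟩ <;> simp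
    rw [hA, hstart, peel_spec ((hr.map List.length).foldl max 0) 0 hr hbound, Nat.sub_zero]
    exact List.map_congr_left (fun j _ => congrArg (colA hr) (Nat.zero_add j).symm)
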